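-- pv_equiv track=rewrite | github.com/jamesfowkes/advent-of-code-15 | d25.py | get_strip
-- ===== SOURCE A (Python) =====
-- def get_next_number(n):
-- 	return (n * 252533) % 33554393
--
-- def get_strip(n, last=0):
-- 	if n == 1:
-- 		return [20151125]
--
-- 	next = get_next_number(last)
-- 	strip = []
-- 	for _ in range(n):
-- 		strip.append(next)
-- 		next = get_next_number(next)
--
-- 	return strip
-- ===== SOURCE B (Python) =====
-- def get_strip(n, last=0):
--     if n == 1:
--         return [20151125]
--     M = 33554393
--     return [(last * pow(252533, i + 1, M)) % M for i in range(n)]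
-- ===== Notes on version B (the rewrite author's own statement) =====
-- stated objective: alternative
-- what changed: Replaces the chained running-product loop (each element derived from the previous via get_next_number) with a per-element closed form: element i is last*252533^(i+1) mod 33554393 computed independently by modular exponentiation.
import Mathlib
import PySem

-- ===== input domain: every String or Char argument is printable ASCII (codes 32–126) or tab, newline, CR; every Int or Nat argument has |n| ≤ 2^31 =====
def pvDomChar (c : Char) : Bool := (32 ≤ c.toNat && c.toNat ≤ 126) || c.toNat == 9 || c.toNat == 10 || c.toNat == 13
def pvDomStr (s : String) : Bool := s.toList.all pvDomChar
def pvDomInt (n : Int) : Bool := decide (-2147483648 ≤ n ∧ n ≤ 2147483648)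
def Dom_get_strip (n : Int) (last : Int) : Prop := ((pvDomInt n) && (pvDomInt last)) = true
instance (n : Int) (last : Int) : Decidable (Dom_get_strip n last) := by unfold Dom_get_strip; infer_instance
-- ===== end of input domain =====

-- B replaces A's chained running-product loop by an independent per-element
-- closed form last*252533^(i+1) mod 33554393 (alternative decomposition, not faster).

-- ===== PORT A =====
def get_next_number (m : Int) : Int := PySem.Int.mod (m * 252533) 33554393

def get_strip (n : Int) (last : Int) : List Int :=
  if n = 1 then [20151125]
  else
    let next := get_next_number last
    ((PySem.List.pyRange 0 n 1).foldl
      (fun (st : List Int × Int) _ => (st.1 ++ [st.2], get_next_number st.2))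
      (([] : List Int), next)).1

-- ===== PORT B =====
def get_strip_alt (n : Int) (last : Int) : List Int :=
  if n = 1 then [20151125]
  else
    (PySem.List.pyRange 0 n 1).map
      (fun i => PySem.Int.mod (last * PySem.Int.powMod 252533 (i + 1).toNat 33554393) 33554393)

-- ===== PRECONDITION & SPEC =====
def Spec_get_strip (n : Int) (last : Int) (out : List Int) : Prop := out = get_strip_alt n last
instance (n : Int) (last : Int) (out : List Int) : Decidable (Spec_get_strip n last out) := by unfold Spec_get_strip; infer_instance

-- ===== CLAIM (what is proved, stated in full; the proofs are below) =====
def Claim_equal_get_strip : Prop := ∀ (n : Int) (last : Int), Dom_get_strip n last → Spec_get_strip n last (get_strip n last)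

-- ===== LEMMAS AND PROOFS =====

-- the k-th closed-form value: last * 252533^k mod 33554393
def pvE (last : Int) (k : Nat) : Int := PySem.Int.mod (last * 252533 ^ k) 33554393

theorem fmodM (a : Int) : a.fmod 33554393 = a % 33554393 := by
  simp [Int.fmod_eq_emod]

theorem pvE_step (last : Int) (k : Nat) :
    get_next_number (pvE last k) = pvE last (k + 1) := by
  simp only [get_next_number, pvE, PySem.Int.mod, fmodM]
  rw [Int.mul_emod, Int.emod_emod_of_dvd _ dvd_rfl, ← Int.mul_emod]
  ring_nf

theorem chainA (l : List Int) (last : Int) (k : Nat) (acc : List Int) :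
    l.foldl (fun (st : List Int × Int) _ => (st.1 ++ [st.2], get_next_number st.2))
      (acc, pvE last (k + 1))
    = (acc ++ (List.range l.length).map (fun i => pvE last (k + 1 + i)),
       pvE last (k + 1 + l.length)) := by
  induction l generalizing k acc with
  | nil => simp
  | cons x xs ih =>
    simp only [List.foldl_cons, pvE_step, List.length_cons]
    rw [ih (k + 1)]
    refine Prod.ext ?_ ?_
    · rw [List.append_assoc, List.singleton_append, List.range_succ_eq_map,
        List.map_cons, List.map_map]
      rw [Nat.add_zero]
      have hm : (List.range xs.length).map ((fun i => pvE last (k + 1 + i)) ∘ Nat.succ)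
          = (List.range xs.length).map (fun i => pvE last (k + 1 + 1 + i)) := by
        apply List.map_congr_left
        intro i _
        simp only [Function.comp_apply, Nat.succ_eq_add_one]
        congr 1
        omega
      rw [hm]
    · simp only
      congr 1
      omega

theorem pow_fmod_collapse (last : Int) (k : Nat) :
    PySem.Int.mod (last * PySem.Int.powMod 252533 k 33554393) 33554393 = pvE last k := by
  simp only [PySem.Int.powMod, pvE, PySem.Int.mod, fmodM]
  rw [Int.mul_emod, Int.emod_emod_of_dvd _ dvd_rfl, ← Int.mul_emod]

-- ===== VERDICT (by name: the statement is the Claim_ definition above) =====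
theorem get_strip_spec : Claim_equal_get_strip := by
  intro n last _
  unfold Spec_get_strip get_strip get_strip_alt
  by_cases h1 : n = 1
  · simp [h1]
  · simp only [h1, if_false]
    have hlast : get_next_number last = pvE last (0 + 1) := by
      simp [get_next_number, pvE]
    rw [hlast, chainA]
    rw [PySem.List.pyRange_one]
    simp only [List.map_map, List.length_map, List.length_range, List.nil_append]
    apply List.map_congr_left
    intro i hi
    simp only [Function.comp_apply, zero_add]
    rw [show ((i : Int) + 1).toNat = i + 1 by omega, pow_fmod_collapse]
    congr 1
    omega
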